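-- pv_equiv track=rewrite | github.com/hidegmisi/hungary_2022_gerrymandering | src/hungary_ge/diagnostics/splits.py | n_split_counties_one_draw
-- ===== SOURCE A (Python) =====
-- from collections.abc import Sequence
--
-- def n_split_counties_one_draw(
--     district_labels: Sequence[int],
--     county_ids: Sequence[str],
-- ) -> int:
--     """Count counties that map to **more than one** distinct district label."""
--     by_county: dict[str, set[int]] = {}
--     for cty, d in zip(county_ids, district_labels, strict=True):
--         if cty not in by_county:
--             by_county[cty] = set()
--         by_county[cty].add(int(d))
--     return sum(1 for dists in by_county.values() if len(dists) > 1)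
-- ===== SOURCE B (Python) =====
-- def n_split_counties_one_draw(district_labels, county_ids):
--     """Count counties that map to **more than one** distinct district label."""
--     pairs = list(zip(county_ids, district_labels, strict=True))
--     return sum(
--         1
--         for c in dict.fromkeys(county_ids)
--         if len({int(d) for cc, d in pairs if cc == c}) > 1
--     )
-- ===== Notes on version B (the rewrite author's own statement) =====
-- stated objective: simpler
-- what changed: Replaces the single-pass mutable dict-of-sets accumulation with a comprehension over the distinct counties (dict.fromkeys) that re-scans the zipped pairs once per county and counts counties whose district-value set has size > 1.
import Mathlib
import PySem

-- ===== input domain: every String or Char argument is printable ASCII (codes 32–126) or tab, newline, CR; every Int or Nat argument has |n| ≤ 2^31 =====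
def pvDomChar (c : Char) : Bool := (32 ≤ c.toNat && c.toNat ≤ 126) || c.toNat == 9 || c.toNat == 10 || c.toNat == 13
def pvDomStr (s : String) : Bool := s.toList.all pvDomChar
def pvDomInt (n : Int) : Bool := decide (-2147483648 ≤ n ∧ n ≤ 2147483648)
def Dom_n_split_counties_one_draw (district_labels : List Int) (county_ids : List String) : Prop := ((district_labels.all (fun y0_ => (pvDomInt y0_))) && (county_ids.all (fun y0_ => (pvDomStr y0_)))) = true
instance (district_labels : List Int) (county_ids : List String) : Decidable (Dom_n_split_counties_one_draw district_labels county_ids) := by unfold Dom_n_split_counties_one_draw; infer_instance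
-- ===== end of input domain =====

-- B counts, per distinct county (dict.fromkeys order), the counties whose per-county set of district
-- labels has more than one element, re-scanning the pair list once per county — instead of A's
-- single pass accumulating a mutable dict of sets.

-- ===== PORT A =====
def n_split_counties_one_draw (district_labels : List Int) (county_ids : List String) : Int :=
  let byCounty : PySem.Dict String (PySem.Set Int) :=
    (county_ids.zip district_labels).foldl
      (fun d p =>
        let d := if d.contains p.1 then d else d.insert p.1 PySem.Set.empty
        d.modify p.1 PySem.Set.empty (fun s => PySem.Set.add s p.2))
      PySem.Dict.empty
  (PySem.Dict.values byCounty).foldl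
    (fun acc dists => if 1 < PySem.Set.len dists then acc + 1 else acc) 0

-- ===== PORT B =====
def n_split_counties_one_draw_alt (district_labels : List Int) (county_ids : List String) : Int :=
  let pairs := county_ids.zip district_labels
  ((PySem.List.dedup county_ids).map
    (fun c =>
      if 1 < PySem.Set.len (PySem.Set.ofList ((pairs.filter (fun p => p.1 == c)).map (fun p => p.2)))
      then (1 : Int) else 0)).sum

-- ===== PRECONDITION & SPEC =====
-- Pre_ excludes exactly the inputs of unequal length, on which A's zip(..., strict=True) raises ValueError.
def Pre_n_split_counties_one_draw (district_labels : List Int) (county_ids : List String) : Prop :=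
  district_labels.length = county_ids.length
instance (district_labels : List Int) (county_ids : List String) : Decidable (Pre_n_split_counties_one_draw district_labels county_ids) := by unfold Pre_n_split_counties_one_draw; infer_instance

def pvWitness_n_split_counties_one_draw : List Int × List String := ([1, 2, 1], ["a", "a", "b"])

def Spec_n_split_counties_one_draw (district_labels : List Int) (county_ids : List String) (out : Int) : Prop := out = n_split_counties_one_draw_alt district_labels county_ids
instance (district_labels : List Int) (county_ids : List String) (out : Int) : Decidable (Spec_n_split_counties_one_draw district_labels county_ids out) := by unfold Spec_n_split_counties_one_draw; infer_instance

-- ===== CLAIM (what is proved, stated in full; the proofs are below) =====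
def Claim_equal_n_split_counties_one_draw : Prop := ∀ (district_labels : List Int) (county_ids : List String), Dom_n_split_counties_one_draw district_labels county_ids → Pre_n_split_counties_one_draw district_labels county_ids → Spec_n_split_counties_one_draw district_labels county_ids (n_split_counties_one_draw district_labels county_ids)

-- ===== LEMMAS AND PROOFS =====

-- overwriting a just-inserted key is one insert
lemma insert_insert_self {κ ν : Type} [BEq κ] [LawfulBEq κ] (d : PySem.Dict κ ν) (k : κ) (v w : ν) :
    (d.insert k v).insert k w = d.insert k w := by
  apply PySem.Dict.ext
  have hc : (d.insert k v).contains k = true := by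
    simp
  rw [PySem.Dict.items_insert_of_contains _ _ hc]
  by_cases h : d.contains k
  · rw [PySem.Dict.items_insert_of_contains _ _ h, PySem.Dict.items_insert_of_contains _ _ h]
    rw [List.map_map]
    apply List.map_congr_left; intro p _
    simp only [Function.comp]; split <;> simp_all
  · have h' : d.contains k = false := by simpa using h
    rw [PySem.Dict.items_insert_of_not_contains _ _ h',
        PySem.Dict.items_insert_of_not_contains _ _ h']
    rw [List.map_append]
    congr 1
    · conv_rhs => rw [← List.map_id d.items]
      apply List.map_congr_left; intro p hp
      have hpk : (p.1 == k) = false := by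
        rw [beq_eq_false_iff_ne]
        intro hk; apply h
        rw [PySem.Dict.contains_iff_mem_keys]
        rw [← hk]
        exact PySem.Dict.mem_keys_of_mem_items _ hp
      simp [hpk]
    · simp

-- A's guarded "init to empty set, then add" step is the same Dict transformation as a bare modify
lemma stepA_eq_modify (d : PySem.Dict String (PySem.Set Int)) (p : String × Int) :
    (let d' := if d.contains p.1 then d else d.insert p.1 PySem.Set.empty
     d'.modify p.1 PySem.Set.empty (fun s => PySem.Set.add s p.2))
    = d.modify p.1 PySem.Set.empty (fun s => PySem.Set.add s p.2) := by
  by_cases h : d.contains p.1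
  · simp [h]
  · have h' : d.contains p.1 = false := by simpa using h
    simp only [h', Bool.false_eq_true, if_false, PySem.Dict.modify]
    rw [PySem.Dict.getD_insert_self, PySem.Dict.getD_of_not_contains _ _ h']
    exact insert_insert_self _ _ _ _

-- value at key c after the modify-fold = the per-county set built from the filtered pairs
lemma getD_fold_modify_setadd (l : List (String × Int)) (d : PySem.Dict String (PySem.Set Int)) (c : String) :
    (l.foldl (fun d p => d.modify p.1 PySem.Set.empty (fun s => PySem.Set.add s p.2)) d).getD c PySem.Set.empty
      = PySem.Set.update (d.getD c PySem.Set.empty) ((l.filter (fun p => p.1 == c)).map (fun p => p.2)) := by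
  induction l generalizing d with
  | nil => rfl
  | cons p l ih =>
    rw [List.foldl_cons, ih]
    by_cases h : p.1 = c
    · simp [h, PySem.Set.update]
    · have h' : (p.1 == c) = false := by simpa using h
      simp [h', PySem.Dict.getD_modify, Ne.symm h]

-- counting a predicate over a Nodup dict's values = counting it over its keys through getD
lemma countP_values_eq_keys {κ ν : Type} [BEq κ] [LawfulBEq κ] (d : PySem.Dict κ ν) (d0 : ν)
    (p : ν → Bool) (h : d.keys.Nodup) :
    (PySem.Dict.values d).countP p = d.keys.countP (fun k => p (d.getD k d0)) := by
  simp only [PySem.Dict.values, PySem.Dict.keys, List.countP_map]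
  apply List.countP_congr
  intro kv hkv
  simp only [Function.comp]
  rw [PySem.Dict.getD_of_mem_items (k := kv.1) (v := kv.2) _ (by simpa using hkv) h]

lemma a_eq_b (dl : List Int) (cid : List String) (hpre : dl.length = cid.length) :
    n_split_counties_one_draw dl cid = n_split_counties_one_draw_alt dl cid := by
  unfold n_split_counties_one_draw n_split_counties_one_draw_alt
  simp only []
  have hstep : (fun (d : PySem.Dict String (PySem.Set Int)) (p : String × Int) =>
      let d' := if d.contains p.1 then d else d.insert p.1 PySem.Set.empty
      d'.modify p.1 PySem.Set.empty (fun s => PySem.Set.add s p.2)) =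
      (fun d p => d.modify p.1 PySem.Set.empty (fun s => PySem.Set.add s p.2)) :=
    funext fun d => funext fun p => stepA_eq_modify d p
  rw [hstep]
  set l := cid.zip dl with hl
  set byCounty := l.foldl (fun d p => d.modify p.1 PySem.Set.empty (fun s => PySem.Set.add s p.2)) PySem.Dict.empty with hbc
  have hnodup : byCounty.keys.Nodup := by
    rw [hbc]
    exact PySem.Dict.nodup_keys_foldl_modify_key l Prod.fst PySem.Set.empty
      (fun d x => fun s => PySem.Set.add s x.2) PySem.Dict.empty (by simp [PySem.Dict.keys_empty])
  have hkeys : byCounty.keys = PySem.Set.ofList cid := by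
    rw [hbc, PySem.Dict.keys_foldl_modify_key l Prod.fst PySem.Set.empty
      (fun d x => fun s => PySem.Set.add s x.2) PySem.Dict.empty]
    rw [PySem.Dict.keys_empty]
    rw [hl, List.map_fst_zip (l₁ := cid) (l₂ := dl) (by omega)]
    rfl
  have hfold : ∀ (a : Int),
      (PySem.Dict.values byCounty).foldl (fun acc dists => if 1 < PySem.Set.len dists then acc + 1 else acc) a
        = a + ((PySem.Dict.values byCounty).countP (fun s => decide (1 < PySem.Set.len s)) : Int) := by
    intro a
    have := PySem.List.foldl_count_if (fun s => decide (1 < PySem.Set.len s)) (PySem.Dict.values byCounty) a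
    simpa using this
  rw [hfold 0, zero_add]
  rw [countP_values_eq_keys byCounty PySem.Set.empty _ hnodup]
  rw [hkeys]
  rw [PySem.List.dedup_eq_ofList]
  have hsum := PySem.List.sum_map_ite_one_zero
      (fun c => decide (1 < PySem.Set.len (PySem.Set.ofList ((l.filter (fun p => p.1 == c)).map (fun p => p.2)))))
      (PySem.Set.ofList cid)
  simp only [decide_eq_true_eq] at hsum
  rw [hsum]
  congr 1
  apply List.countP_congr
  intro c _
  rw [hbc, getD_fold_modify_setadd]
  simp [PySem.Dict.getD_empty, PySem.Set.update, PySem.Set.ofList]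

-- ===== VERDICT (by name: the statement is the Claim_ definition above) =====
theorem n_split_counties_one_draw_spec : Claim_equal_n_split_counties_one_draw := by
  intro dl cid _ hpre
  exact a_eq_b dl cid hpre
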